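-- pv_equiv track=rewrite | github.com/jorgenfinsveen/tracer-vulkan-sim | accel-sim-framework/pipeline/utility/plots/stacked_bar_chart.py | gorup_benchmakr_with_configs
-- ===== SOURCE A (Python) =====
-- def gorup_benchmakr_with_configs(benchmarks, configs):
--     x_benchmarks = []
--     x_configs = []
--
--     for b in benchmarks:
--         for c in configs:
--             x_benchmarks.append(b)
--             x_configs.append(c)
--
--     return x_benchmarks, x_configs
-- ===== SOURCE B (Python) =====
-- def gorup_benchmakr_with_configs(benchmarks, configs):
--     m = len(configs)
--     total = len(benchmarks) * m
--     x_benchmarks = [benchmarks[k // m] for k in range(total)]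
--     x_configs = [configs[k % m] for k in range(total)]
--     return x_benchmarks, x_configs
-- ===== Notes on version B (the rewrite author's own statement) =====
-- stated objective: alternative
-- what changed: Replaces the nested append loops with flat index arithmetic: one pass over k in range(len(benchmarks)*len(configs)) picking benchmarks[k//m] and configs[k%m].
import Mathlib
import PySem

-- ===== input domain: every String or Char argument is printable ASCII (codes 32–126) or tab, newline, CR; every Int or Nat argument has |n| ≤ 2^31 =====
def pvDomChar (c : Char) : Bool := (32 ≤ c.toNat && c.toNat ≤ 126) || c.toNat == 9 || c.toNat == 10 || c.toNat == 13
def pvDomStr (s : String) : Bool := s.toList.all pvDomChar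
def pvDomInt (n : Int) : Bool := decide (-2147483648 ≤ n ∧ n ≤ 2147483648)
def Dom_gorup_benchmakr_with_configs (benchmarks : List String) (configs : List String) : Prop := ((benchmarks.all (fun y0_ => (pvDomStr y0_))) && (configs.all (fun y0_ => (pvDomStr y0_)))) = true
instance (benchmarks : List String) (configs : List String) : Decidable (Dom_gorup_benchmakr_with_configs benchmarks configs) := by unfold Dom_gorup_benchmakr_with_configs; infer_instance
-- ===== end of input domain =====

-- B builds both lists in one flat pass over k ∈ range(n*m) using index arithmetic k//m and k%m,
-- instead of A's nested append loops; objective: alternative (same cost, different algorithm).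

-- ===== PORT A =====
-- literal port: nested loop appending b and c pair-wise to the two accumulators
def gorup_benchmakr_with_configs (benchmarks : List String) (configs : List String) : List String × List String :=
  benchmarks.foldl
    (fun acc b =>
      configs.foldl (fun acc2 c => (acc2.1 ++ [b], acc2.2 ++ [c])) acc)
    ([], []) 

-- ===== PORT B =====
-- flat index construction: benchmarks[k // m] and configs[k % m] for k in range(total).
-- Python's k // m and k % m on these nonnegative in-range indices are Nat / and %;
-- the list indexings never go out of range (k < n*m), so List.getD with a dummy default is exact.
def gorup_benchmakr_with_configs_alt (benchmarks : List String) (configs : List String) : List String × List String :=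
  ((List.range (benchmarks.length * configs.length)).map (fun k => benchmarks.getD (k / configs.length) ""),
   (List.range (benchmarks.length * configs.length)).map (fun k => configs.getD (k % configs.length) ""))

-- ===== PRECONDITION & SPEC =====
def Spec_gorup_benchmakr_with_configs (benchmarks : List String) (configs : List String) (out : List String × List String) : Prop := out = gorup_benchmakr_with_configs_alt benchmarks configs
instance (benchmarks : List String) (configs : List String) (out : List String × List String) : Decidable (Spec_gorup_benchmakr_with_configs benchmarks configs out) := by unfold Spec_gorup_benchmakr_with_configs; infer_instance

-- ===== CLAIM (what is proved, stated in full; the proofs are below) =====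
def Claim_equal_gorup_benchmakr_with_configs : Prop := ∀ (benchmarks : List String) (configs : List String), Dom_gorup_benchmakr_with_configs benchmarks configs → Spec_gorup_benchmakr_with_configs benchmarks configs (gorup_benchmakr_with_configs benchmarks configs)

-- ===== LEMMAS AND PROOFS =====

-- A's inner loop appends `configs.length` copies of b to the first list and configs to the second
theorem pv_inner (configs : List String) (b : String) (acc : List String × List String) :
    configs.foldl (fun acc2 c => (acc2.1 ++ [b], acc2.2 ++ [c])) acc
      = (acc.1 ++ List.replicate configs.length b, acc.2 ++ configs) := by
  induction configs generalizing acc with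
  | nil => simp
  | cons c cs ih => simp [List.foldl, ih, List.replicate_succ]

-- A's whole loop, closed form
theorem pv_outer (benchmarks configs : List String) (acc : List String × List String) :
    benchmarks.foldl
      (fun acc b => configs.foldl (fun acc2 c => (acc2.1 ++ [b], acc2.2 ++ [c])) acc) acc
    = (acc.1 ++ benchmarks.flatMap (fun b => List.replicate configs.length b),
       acc.2 ++ (List.replicate benchmarks.length configs).flatten) := by
  induction benchmarks generalizing acc with
  | nil => simp
  | cons b bs ih =>
      rw [List.foldl_cons, ih, pv_inner]
      simp [List.replicate_succ]

-- mapping getD over range of the length reproduces the list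
theorem pv_self (l : List String) (d : String) :
    (List.range l.length).map (fun k => l.getD k d) = l := by
  apply List.ext_getElem
  · simp
  · intro i h1 h2
    simp [List.getD_eq_getElem?_getD, h2]

-- B's first component equals the flatMap-of-replicates form
theorem pv_bench (benchmarks : List String) (m : Nat) (hm : 0 < m) :
    (List.range (benchmarks.length * m)).map (fun k => benchmarks.getD (k / m) "")
      = benchmarks.flatMap (fun b => List.replicate m b) := by
  induction benchmarks with
  | nil => simp
  | cons b bs ih =>
      have h : (b :: bs).length * m = m + bs.length * m := by
        simp [List.length_cons, Nat.succ_mul, Nat.add_comm]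
      have hcomp : ((fun k => (b :: bs).getD (k / m) "") ∘ (fun i => m + i))
          = fun k => bs.getD (k / m) "" := by
        funext k
        simp [Nat.add_comm m k, Nat.add_div_right _ hm]
      rw [h, List.range_add, List.map_append, List.map_map, List.flatMap_cons, hcomp, ih]
      congr 1
      rw [List.map_congr_left (g := fun _ => b)
        (by intro k hk; simp [Nat.div_eq_of_lt (List.mem_range.mp hk)])]
      simp

-- B's second component equals the flatten-of-replicates form
theorem pv_conf (configs : List String) (n : Nat) :
    (List.range (n * configs.length)).map (fun k => configs.getD (k % configs.length) "")
      = (List.replicate n configs).flatten := by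
  induction n with
  | zero => simp
  | succ n ih =>
      rw [Nat.succ_mul, List.range_add, List.map_append, List.map_map, ih,
        List.replicate_succ' , List.flatten_append]
      congr 1
      rw [List.map_congr_left (g := fun k => configs.getD k "")
        (by intro k hk
            simp [Function.comp, Nat.mod_eq_of_lt (List.mem_range.mp hk)])]
      rw [pv_self configs ""]; simp

-- ===== VERDICT (by name: the statement is the Claim_ definition above) =====
theorem gorup_benchmakr_with_configs_spec : Claim_equal_gorup_benchmakr_with_configs := by
  intro benchmarks configs _
  unfold Spec_gorup_benchmakr_with_configs gorup_benchmakr_with_configs gorup_benchmakr_with_configs_alt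
  rw [pv_outer]
  rcases Nat.eq_zero_or_pos configs.length with h | h
  · rcases List.length_eq_zero_iff.mp h with rfl
    simp
  · rw [pv_bench benchmarks configs.length h, pv_conf configs benchmarks.length]
    simp
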